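-- pv_equiv track=rewrite | github.com/vineykhera/leetcode | 1814-count-nice-pairs-in-an-array/1814-count-nice-pairs-in-an-array.py | countNicePairs
-- ===== SOURCE A (Python) =====
-- from typing import List
--
-- def countNicePairs(nums: List[int]) -> int:
--     d = {}
--     for n in nums:
--         s = n - int(str(n)[::-1])
--         if s not in d:
--             d[s] = 1
--         else:
--             d[s] += 1
--     out = 0
--     for s in d.values():
--         out += s * (s-1)//2
--     return out % ((10**9) + 7)
-- ===== SOURCE B (Python) =====
-- def countNicePairs(nums):
--     # Single fused pass: running pair total + incremental frequency table.
--     seen = {}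
--     out = 0
--     for n in nums:
--         key = n - int(str(n)[::-1])
--         c = seen.get(key, 0)
--         out += c
--         seen[key] = c + 1
--     return out % (10**9 + 7)
-- ===== Notes on version B (the rewrite author's own statement) =====
-- stated objective: alternative
-- what changed: Replaces A's two-phase algorithm (build a full frequency table, then a second loop summing C(count,2) over its values) by one fused pass that keeps a running pair count: for each element it adds the number of earlier elements with the same n-rev(n) key, then bumps that key's count.
import Mathlib
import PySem

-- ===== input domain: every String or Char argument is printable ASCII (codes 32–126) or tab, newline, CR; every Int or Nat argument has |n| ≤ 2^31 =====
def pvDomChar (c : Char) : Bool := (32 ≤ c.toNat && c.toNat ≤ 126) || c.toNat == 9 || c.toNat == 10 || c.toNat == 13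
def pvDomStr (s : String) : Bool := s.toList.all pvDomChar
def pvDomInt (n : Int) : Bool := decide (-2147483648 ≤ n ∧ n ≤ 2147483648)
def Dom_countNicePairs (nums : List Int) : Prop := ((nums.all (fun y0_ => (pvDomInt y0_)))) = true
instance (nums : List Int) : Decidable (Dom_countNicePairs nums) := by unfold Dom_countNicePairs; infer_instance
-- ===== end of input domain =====

-- B fuses A's two loops (frequency table, then a second loop summing c*(c-1)//2)
-- into one pass that keeps a running pair total; return values are equal.

-- ===== PORT A =====
-- shared key computation: n - int(str(n)[::-1]); exact (slice? with step -1 is the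
-- reverse, ofStr? = int(); the getD defaults are unreachable inside Pre_, where n ≥ 0)
def pvKey (n : Int) : Int :=
  n - (PySem.Int.ofStr? ((PySem.Str.slice? (PySem.Int.toStr n) none none (-1)).getD "")).getD 0

def countNicePairs (nums : List Int) : Int :=
  PySem.Int.mod
    (((nums.foldl (fun d n =>
        let s := pvKey n
        if d.contains s = false then d.insert s 1 else d.insert s (d.getD s 0 + 1))
        PySem.Dict.empty).values).foldl
      (fun out s => out + PySem.Int.floordiv (s * (s - 1)) 2) 0)
    (10 ^ 9 + 7)

-- ===== PORT B =====
def countNicePairs_alt (nums : List Int) : Int :=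
  PySem.Int.mod
    ((nums.foldl (fun (p : Int × PySem.Dict Int Int) n =>
        let key := pvKey n
        let c := p.2.getD key 0
        (p.1 + c, p.2.insert key (c + 1))) (0, PySem.Dict.empty)).1)
    (10 ^ 9 + 7)

-- ===== PRECONDITION & SPEC =====
-- Pre_ excludes lists containing a negative number: there int(str(n)[::-1]) raises
-- ValueError in A (and in B alike), so A returns exactly on the all-nonnegative lists.
def Pre_countNicePairs (nums : List Int) : Prop := (nums.all (fun n => 0 ≤ n)) = true
instance (nums : List Int) : Decidable (Pre_countNicePairs nums) := by unfold Pre_countNicePairs; infer_instance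
def pvWitness_countNicePairs : List Int := [11, 22, 13, 22, 0]

def Spec_countNicePairs (nums : List Int) (out : Int) : Prop := out = countNicePairs_alt nums
instance (nums : List Int) (out : Int) : Decidable (Spec_countNicePairs nums out) := by unfold Spec_countNicePairs; infer_instance

-- ===== CLAIM (what is proved, stated in full; the proofs are below) =====
def Claim_equal_countNicePairs : Prop := ∀ (nums : List Int), Dom_countNicePairs nums → Pre_countNicePairs nums → Spec_countNicePairs nums (countNicePairs nums)

-- ===== LEMMAS AND PROOFS =====

-- the per-bucket contribution c*(c-1)//2 and the bucket sum both ports compute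
def pvFC (c : Int) : Int := PySem.Int.floordiv (c * (c - 1)) 2
def pvSumC (ks : List Int) : Int := ((PySem.Set.ofList ks).map (fun k => pvFC (ks.count k : Int))).sum

theorem pvFC_natCast (m : Nat) : pvFC (m : Int) = ((m * (m - 1) / 2 : Nat) : Int) := by
  cases m with
  | zero => decide
  | succ j =>
      unfold pvFC
      have h1 : ((j + 1 : Nat) : Int) * (((j + 1 : Nat) : Int) - 1) = (((j + 1) * j : Nat) : Int) := by
        push_cast; ring
      rw [h1]
      have h2 : (j + 1) * (j + 1 - 1) = (j + 1) * j := by simp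
      rw [h2]
      exact_mod_cast PySem.Int.floordiv_natCast ((j + 1) * j) 2

theorem pvFC_step (m : Nat) : pvFC ((m : Int) + 1) = pvFC (m : Int) + m := by
  have h : ((m : Int) + 1) = ((m + 1 : Nat) : Int) := by push_cast; ring
  rw [h, pvFC_natCast, pvFC_natCast]
  obtain ⟨t, ht⟩ : ∃ t, m * (m - 1) = 2 * t := by
    cases m with
    | zero => exact ⟨0, rfl⟩
    | succ j =>
        rcases Nat.even_mul_succ_self j with ⟨t, ht⟩
        refine ⟨t, ?_⟩
        have : (j + 1) * (j + 1 - 1) = j * (j + 1) := by simp [Nat.mul_comm]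
        omega
  have hb : (m + 1) * (m + 1 - 1) = m * (m - 1) + 2 * m := by
    cases m with
    | zero => rfl
    | succ j =>
        have e1 : (j + 1 + 1) * (j + 1 + 1 - 1) = (j + 1) * (j + 1) + (j + 1) := by
          simp; ring
        have e2 : (j + 1) * (j + 1 - 1) = (j + 1) * j := by simp
        rw [e1, e2]; ring
  have key : (m + 1) * (m + 1 - 1) / 2 = m * (m - 1) / 2 + m := by omega
  rw [key]; push_cast; ring

-- replacing one summand of a sum over a Nodup list
theorem pvSum_map_update (s : List Int) (hs : s.Nodup) (k : Int) (hk : k ∈ s)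
    (g' g : Int → Int) (δ : Int)
    (hne : ∀ j ∈ s, j ≠ k → g' j = g j) (heq : g' k = g k + δ) :
    (s.map g').sum = (s.map g).sum + δ := by
  induction s with
  | nil => cases hk
  | cons a s ih =>
      rcases List.nodup_cons.mp hs with ⟨ha, hs'⟩
      rcases List.mem_cons.mp hk with hk | hk
      · subst hk
        have hrest : ∀ j ∈ s, g' j = g j := fun j hj =>
          hne j (List.mem_cons_of_mem _ hj) (fun h => ha (h ▸ hj))
        simp only [List.map_cons, List.sum_cons, heq, List.map_congr_left hrest]
        ring
      · have ha' : a ≠ k := fun h => ha (h ▸ hk)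
        rw [List.map_cons, List.map_cons, List.sum_cons, List.sum_cons,
          hne a List.mem_cons_self ha',
          ih hs' hk (fun j hj hjk => hne j (List.mem_cons_of_mem _ hj) hjk)]
        ring

theorem pvSumC_append (kl : List Int) (k : Int) :
    pvSumC (kl ++ [k]) = pvSumC kl + (kl.count k : Int) := by
  unfold pvSumC
  rw [PySem.Set.ofList_append_singleton]
  by_cases hk : k ∈ kl
  · rw [PySem.Set.add_of_mem ((PySem.Set.mem_ofList kl k).mpr hk)]
    refine pvSum_map_update (PySem.Set.ofList kl) (PySem.Set.nodup_ofList kl) k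
      ((PySem.Set.mem_ofList kl k).mpr hk) _ _ (kl.count k : Int)
      (fun j hj hjk => ?_) ?_
    · have hcnt : (kl ++ [k]).count j = kl.count j := by
        simp [List.count_append, Ne.symm hjk]
      rw [hcnt]
    · have hcnt : (kl ++ [k]).count k = kl.count k + 1 := by simp
      rw [hcnt, Nat.cast_add, Nat.cast_one, pvFC_step]
  · rw [PySem.Set.add_of_not_mem (fun h => hk ((PySem.Set.mem_ofList kl k).mp h))]
    have hc0 : kl.count k = 0 := List.count_eq_zero.mpr hk
    have hmap : ∀ j ∈ PySem.Set.ofList kl,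
        pvFC (((kl ++ [k]).count j : Nat) : Int) = pvFC ((kl.count j : Nat) : Int) := by
      intro j hj
      have hjk : j ≠ k := fun h => hk (h ▸ (PySem.Set.mem_ofList kl j).mp hj)
      have hcnt : (kl ++ [k]).count j = kl.count j := by
        simp [List.count_append, Ne.symm hjk]
      rw [hcnt]
    have h1 : (kl ++ [k]).count k = 1 := by simp [hc0]
    rw [List.map_append, List.sum_append, List.map_congr_left hmap]
    simp [hc0, show pvFC 1 = 0 from by decide]

-- A's value in closed form
theorem pvA_val (nums : List Int) :
    countNicePairs nums = PySem.Int.mod (pvSumC (nums.map pvKey)) (10 ^ 9 + 7) := by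
  unfold countNicePairs
  have hstep : (fun (d : PySem.Dict Int Int) n =>
      let s := pvKey n
      if d.contains s = false then d.insert s 1 else d.insert s (d.getD s 0 + 1)) =
      (fun d n => d.insert (pvKey n) (d.getD (pvKey n) 0 + 1)) := by
    funext d n
    by_cases h : d.contains (pvKey n) = false
    · simp [h, PySem.Dict.getD_of_not_contains d 0 h]
    · simp [h]
  rw [hstep, ← List.foldl_map (f := pvKey)
      (g := fun (d : PySem.Dict Int Int) k => d.insert k (d.getD k 0 + 1)),
    PySem.Dict.foldl_insert_getD_add_one_eq_counter,
    PySem.List.foldl_add]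
  have hvals : (PySem.Dict.counter (nums.map pvKey)).values =
      (PySem.Set.ofList (nums.map pvKey)).map (fun k => (((nums.map pvKey).count k : Nat) : Int)) := by
    show (PySem.Dict.counter (nums.map pvKey)).items.map (·.2) = _
    rw [PySem.Dict.items_counter, List.map_map]
    rfl
  rw [hvals, List.map_map]
  unfold pvSumC pvFC
  norm_num [Function.comp_def]

-- B's loop invariant: after any prefix, the accumulator is (pair total so far, counter so far)
theorem pvB_inv (nums : List Int) :
    nums.foldl (fun (p : Int × PySem.Dict Int Int) n =>
      let key := pvKey n
      let c := p.2.getD key 0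
      (p.1 + c, p.2.insert key (c + 1))) (0, PySem.Dict.empty) =
    (pvSumC (nums.map pvKey), PySem.Dict.counter (nums.map pvKey)) := by
  induction nums using List.reverseRecOn with
  | nil => simp [pvSumC]; rfl
  | append_singleton l a ih =>
      rw [List.foldl_append, ih]
      simp only [List.foldl_cons, List.foldl_nil]
      have hc : (PySem.Dict.counter (l.map pvKey)).getD (pvKey a) 0 =
          ((l.map pvKey).count (pvKey a) : Int) := PySem.Dict.getD_counter _ _
      have hd : PySem.Dict.counter (l.map pvKey ++ [pvKey a]) =
          (PySem.Dict.counter (l.map pvKey)).insert (pvKey a)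
            (((l.map pvKey).count (pvKey a) : Int) + 1) := by
        rw [← PySem.Dict.foldl_insert_getD_add_one_eq_counter, List.foldl_append,
          PySem.Dict.foldl_insert_getD_add_one_eq_counter]
        simp [PySem.Dict.getD_counter]
      simp [hc, hd, pvSumC_append]

-- ===== VERDICT (by name: the statement is the Claim_ definition above) =====
theorem countNicePairs_spec : Claim_equal_countNicePairs := by
  intro nums _ _
  unfold Spec_countNicePairs countNicePairs_alt
  rw [pvB_inv, pvA_val]
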